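-- pv_equiv track=rewrite | github.com/puxin131/LLM_Auto_Test | src/rag/analysis/linkage_extractor.py | _trace_refs_from_docs
-- ===== SOURCE A (Python) =====
-- from typing import Any, Dict, List, Tuple
--
-- def _trace_refs_from_docs(docs: Dict[str, Dict[str, Any]]) -> Dict[str, List[str]]:
--     req_ids: List[str] = []
--     api_ids: List[str] = []
--     testcase_ids: List[str] = []
--     ui_ids: List[str] = []
--     for doc_key, meta in docs.items():
--         source_type = str(meta.get("source_type", "unknown"))
--         if source_type == "requirement" and doc_key not in req_ids:
--             req_ids.append(doc_key)
--         elif source_type == "api_doc" and doc_key not in api_ids: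
--             api_ids.append(doc_key)
--         elif source_type == "testcase" and doc_key not in testcase_ids:
--             testcase_ids.append(doc_key)
--         elif source_type == "ui" and doc_key not in ui_ids:
--             ui_ids.append(doc_key)
--     return {
--         "req_ids": req_ids[:20],
--         "api_ids": api_ids[:20],
--         "testcase_ids": testcase_ids[:20],
--         "ui_ids": ui_ids[:20],
--     }
-- ===== SOURCE B (Python) =====
-- from typing import Any, Dict, List
--
--
-- def _trace_refs_from_docs(docs: Dict[str, Dict[str, Any]]) -> Dict[str, List[str]]:
--     groups: Dict[str, List[str]] = {}
--     for doc_key, meta in docs.items():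
--         st = str(meta.get("source_type", "unknown"))
--         groups.setdefault(st, []).append(doc_key)
--     return {
--         "req_ids": groups.get("requirement", [])[:20],
--         "api_ids": groups.get("api_doc", [])[:20],
--         "testcase_ids": groups.get("testcase", [])[:20],
--         "ui_ids": groups.get("ui", [])[:20],
--     }
-- ===== Notes on version B (the rewrite author's own statement) =====
-- stated objective: simpler
-- what changed: Replaces the four named accumulator lists, the if/elif chain and the 'not in' dedup scans with one unconditional grouping loop into a dict-of-lists keyed by source_type, then projects the four known buckets; the dedup is dropped because dict keys are unique, which the Lean Pre_ states explicitly for the association-list encoding.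
import Mathlib
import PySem

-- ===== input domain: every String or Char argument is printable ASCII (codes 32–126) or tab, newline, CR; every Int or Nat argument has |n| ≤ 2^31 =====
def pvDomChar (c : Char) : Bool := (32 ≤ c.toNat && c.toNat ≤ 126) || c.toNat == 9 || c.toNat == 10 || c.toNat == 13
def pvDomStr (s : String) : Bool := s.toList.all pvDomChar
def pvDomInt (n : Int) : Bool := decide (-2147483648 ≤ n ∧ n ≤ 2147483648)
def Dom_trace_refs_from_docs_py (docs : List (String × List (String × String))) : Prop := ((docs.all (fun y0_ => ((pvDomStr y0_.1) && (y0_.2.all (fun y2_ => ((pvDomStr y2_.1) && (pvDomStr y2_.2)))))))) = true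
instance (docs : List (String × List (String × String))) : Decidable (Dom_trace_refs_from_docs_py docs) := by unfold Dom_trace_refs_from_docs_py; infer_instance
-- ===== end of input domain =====

-- Header: B groups all doc keys into one dict-of-lists keyed by source_type in a single
-- unconditional loop and then projects the four known buckets — simpler than A's four named
-- lists with an if/elif chain and per-append 'not in' scans.

-- ===== PORT A =====
-- step of A's for-loop: state = (req_ids, api_ids, testcase_ids, ui_ids)
def pvAStep (st : List String × List String × List String × List String)
    (dk : String × List (String × String)) :
    List String × List String × List String × List String :=
  let source_type := PySem.Dict.getD (PySem.Dict.mk dk.2) "source_type" "unknown"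
  if source_type == "requirement" && !(st.1.contains dk.1) then
    (st.1 ++ [dk.1], st.2.1, st.2.2.1, st.2.2.2)
  else if source_type == "api_doc" && !(st.2.1.contains dk.1) then
    (st.1, st.2.1 ++ [dk.1], st.2.2.1, st.2.2.2)
  else if source_type == "testcase" && !(st.2.2.1.contains dk.1) then
    (st.1, st.2.1, st.2.2.1 ++ [dk.1], st.2.2.2)
  else if source_type == "ui" && !(st.2.2.2.contains dk.1) then
    (st.1, st.2.1, st.2.2.1, st.2.2.2 ++ [dk.1])
  else st

def trace_refs_from_docs_py (docs : List (String × List (String × String))) :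
    List (String × List String) :=
  let s := docs.foldl pvAStep ([], [], [], [])
  [("req_ids", s.1.take 20),
   ("api_ids", s.2.1.take 20),
   ("testcase_ids", s.2.2.1.take 20),
   ("ui_ids", s.2.2.2.take 20)]

-- ===== PORT B =====
def trace_refs_from_docs_py_alt (docs : List (String × List (String × String))) :
    List (String × List String) :=
  let groups : PySem.Dict String (List String) :=
    docs.foldl (fun g dk =>
      let st := PySem.Dict.getD (PySem.Dict.mk dk.2) "source_type" "unknown"
      g.modify st [] (· ++ [dk.1])) PySem.Dict.empty
  [("req_ids", (groups.getD "requirement" []).take 20),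
   ("api_ids", (groups.getD "api_doc" []).take 20),
   ("testcase_ids", (groups.getD "testcase" []).take 20),
   ("ui_ids", (groups.getD "ui" []).take 20)]

-- ===== PRECONDITION & SPEC =====
-- Pre_ states the Python dict invariant: the doc keys are pairwise distinct. An association
-- list with duplicate doc keys cannot arise from the Python argument (a dict), and only there
-- could A's 'not in' dedup and B's unconditional grouping disagree.
def Pre_trace_refs_from_docs_py (docs : List (String × List (String × String))) : Prop :=
  (docs.map Prod.fst).Nodup
instance (docs : List (String × List (String × String))) : Decidable (Pre_trace_refs_from_docs_py docs) := by unfold Pre_trace_refs_from_docs_py; infer_instance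

def pvWitness_trace_refs_from_docs_py : (List (String × List (String × String))) :=
  [("R1", [("source_type", "requirement")]),
   ("A1", [("source_type", "api_doc")]),
   ("X1", [("source_type", "other")]),
   ("U1", [("source_type", "ui")])]

def Spec_trace_refs_from_docs_py (docs : List (String × List (String × String))) (out : List (String × List String)) : Prop := out = trace_refs_from_docs_py_alt docs
instance (docs : List (String × List (String × String))) (out : List (String × List String)) : Decidable (Spec_trace_refs_from_docs_py docs out) := by unfold Spec_trace_refs_from_docs_py; infer_instance

-- ===== CLAIM (what is proved, stated in full; the proofs are below) =====
def Claim_equal_trace_refs_from_docs_py : Prop := ∀ (docs : List (String × List (String × String))), Dom_trace_refs_from_docs_py docs → Pre_trace_refs_from_docs_py docs → Spec_trace_refs_from_docs_py docs (trace_refs_from_docs_py docs)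

-- ===== LEMMAS AND PROOFS =====

-- the key a doc is grouped under
def pvKey (dk : String × List (String × String)) : String :=
  PySem.Dict.getD (PySem.Dict.mk dk.2) "source_type" "unknown"

-- the doc keys selected for bucket c, in order
def pvSel (c : String) (docs : List (String × List (String × String))) : List String :=
  (docs.filter (fun dk => pvKey dk == c)).map Prod.fst

-- A's fold, started from fresh-key-disjoint state, computes init ++ selection per bucket
theorem pvA_fold_eq (docs : List (String × List (String × String)))
    (req api tc ui : List String)
    (hnd : (docs.map Prod.fst).Nodup)
    (hf : ∀ x ∈ docs.map Prod.fst, x ∉ req ∧ x ∉ api ∧ x ∉ tc ∧ x ∉ ui) :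
    docs.foldl pvAStep (req, api, tc, ui) =
      (req ++ pvSel "requirement" docs, api ++ pvSel "api_doc" docs,
       tc ++ pvSel "testcase" docs, ui ++ pvSel "ui" docs) := by
  induction docs generalizing req api tc ui with
  | nil => simp [pvSel]
  | cons dk rest ih =>
    simp only [List.map_cons, List.nodup_cons] at hnd
    have hfd := hf dk.1 (by simp)
    have hf' : ∀ x ∈ rest.map Prod.fst,
        x ∉ req ++ [dk.1] ∧ x ∉ api ++ [dk.1] ∧ x ∉ tc ++ [dk.1] ∧ x ∉ ui ++ [dk.1] := by
      intro x hx
      have hne : x ≠ dk.1 := by rintro rfl; exact hnd.1 hx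
      have := hf x (by simp [hx])
      simp [hne, this.1, this.2.1, this.2.2.1, this.2.2.2]
    have hfrest : ∀ x ∈ rest.map Prod.fst, x ∉ req ∧ x ∉ api ∧ x ∉ tc ∧ x ∉ ui :=
      fun x hx => hf x (by simp [hx])
    simp only [List.foldl_cons]
    by_cases h1 : pvKey dk = "requirement"
    · have : pvAStep (req, api, tc, ui) dk = (req ++ [dk.1], api, tc, ui) := by
        simp [pvAStep, pvKey] at h1 ⊢
        simp [h1, hfd.1]
      rw [this, ih _ _ _ _ hnd.2 (fun x hx => ⟨(hf' x hx).1, (hfrest x hx).2⟩)]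
      simp [pvSel, h1]
    · by_cases h2 : pvKey dk = "api_doc"
      · have : pvAStep (req, api, tc, ui) dk = (req, api ++ [dk.1], tc, ui) := by
          simp [pvAStep, pvKey] at h1 h2 ⊢
          simp [h2, hfd.2.1]
        rw [this, ih _ _ _ _ hnd.2
          (fun x hx => ⟨(hfrest x hx).1, (hf' x hx).2.1, (hfrest x hx).2.2⟩)]
        simp [pvSel, h2]
      · by_cases h3 : pvKey dk = "testcase"
        · have : pvAStep (req, api, tc, ui) dk = (req, api, tc ++ [dk.1], ui) := by
            simp [pvAStep, pvKey] at h1 h2 h3 ⊢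
            simp [h3, hfd.2.2.1]
          rw [this, ih _ _ _ _ hnd.2
            (fun x hx => ⟨(hfrest x hx).1, (hfrest x hx).2.1, (hf' x hx).2.2.1,
              (hfrest x hx).2.2.2⟩)]
          simp [pvSel, h3]
        · by_cases h4 : pvKey dk = "ui"
          · have : pvAStep (req, api, tc, ui) dk = (req, api, tc, ui ++ [dk.1]) := by
              simp [pvAStep, pvKey] at h1 h2 h3 h4 ⊢
              simp [h4, hfd.2.2.2]
            rw [this, ih _ _ _ _ hnd.2
              (fun x hx => ⟨(hfrest x hx).1, (hfrest x hx).2.1, (hfrest x hx).2.2.1,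
                (hf' x hx).2.2.2⟩)]
            simp [pvSel, h4]
          · have : pvAStep (req, api, tc, ui) dk = (req, api, tc, ui) := by
              simp [pvAStep, pvKey] at h1 h2 h3 h4 ⊢
              simp [h1, h2, h3, h4]
            rw [this, ih _ _ _ _ hnd.2 hfrest]
            simp [pvSel, h1, h2, h3, h4]

-- B's grouping dict reads back the per-bucket selection
theorem pvB_getD (docs : List (String × List (String × String))) (c : String) :
    (docs.foldl (fun g dk =>
        g.modify (PySem.Dict.getD (PySem.Dict.mk dk.2) "source_type" "unknown") []
          (· ++ [dk.1])) PySem.Dict.empty).getD c [] = pvSel c docs := by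
  have h := PySem.Dict.getD_foldl_modify_append
    (l := docs.map (fun dk => (pvKey dk, dk.1))) (d := (PySem.Dict.empty : PySem.Dict String (List String))) (c := c)
  rw [List.foldl_map] at h
  simpa [pvKey, pvSel, List.filter_map, Function.comp] using h

-- ===== VERDICT (by name: the statement is the Claim_ definition above) =====
theorem trace_refs_from_docs_py_spec : Claim_equal_trace_refs_from_docs_py := by
  intro docs _ hpre
  show trace_refs_from_docs_py docs = trace_refs_from_docs_py_alt docs
  unfold trace_refs_from_docs_py trace_refs_from_docs_py_alt
  rw [pvA_fold_eq docs [] [] [] [] hpre (by simp)]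
  simp [pvB_getD]
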